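-- pv_equiv track=rewrite | github.com/nethmalds/Algorithms | Practise_Question(Fibonacci).py | humanPopulation
-- ===== SOURCE A (Python) =====
-- def humanPopulation(m,t):
--     left_humans = []
--     for i in range(t):
--         if m[i]<=1:
--             left_humans.append(1%10)
--         elif m[i] == 2:
--             left_humans.append(2%10)
--         else:
--             total = 3
--             n1=1
--             n2=1
--             for n in range(3,m[i],+1):
--                 result = n1 + n2
--                 n2 = n1
--                 n1 = result
--                 total = total + result
--             left_humans.append(total%10)
--
--     return left_humans
-- ===== SOURCE B (Python) =====
-- def humanPopulation(m, t):
--     # Fib mod 10 is periodic with period 60 (Pisano); A's "partial sum" equals F(m_i + 1),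
--     # so one 60-entry table answers every query in O(1).
--     table = []
--     a, b = 0, 1
--     for _ in range(60):
--         table.append(a)
--         a, b = b, (a + b) % 10
--     return [1 if x <= 1 else table[(x + 1) % 60] for x in m[:max(t, 0)]]
-- ===== Notes on version B (the rewrite author's own statement) =====
-- stated objective: faster
-- what changed: Replaces the per-query Fibonacci summation loop by a precomputed 60-entry table of Fibonacci mod 10 (Pisano period), using the identity that A's running sum equals F(m_i+1), so each query is an O(1) table lookup.
import Mathlib
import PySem

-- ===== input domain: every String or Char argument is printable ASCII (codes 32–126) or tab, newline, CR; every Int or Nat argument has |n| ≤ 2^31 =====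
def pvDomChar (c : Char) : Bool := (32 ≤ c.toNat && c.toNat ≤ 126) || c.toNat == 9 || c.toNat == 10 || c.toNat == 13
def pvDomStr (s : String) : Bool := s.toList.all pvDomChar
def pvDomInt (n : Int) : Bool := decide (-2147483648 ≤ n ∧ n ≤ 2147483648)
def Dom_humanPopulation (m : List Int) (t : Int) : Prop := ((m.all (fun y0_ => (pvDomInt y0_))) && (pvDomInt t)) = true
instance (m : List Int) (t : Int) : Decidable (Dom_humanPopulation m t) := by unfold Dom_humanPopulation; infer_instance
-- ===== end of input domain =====

-- B replaces A's per-query Fibonacci summation loop by a 60-entry table of Fib mod 10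
-- (Pisano period), one O(1) lookup per query (objective: faster).

-- ===== PORT A =====
-- per-element body of A's outer loop (the value A appends for m[i])
def pvAinner (mi : Int) : Int :=
  if mi ≤ 1 then PySem.Int.mod 1 10
  else if mi = 2 then PySem.Int.mod 2 10
  else
    let st := (PySem.List.pyRange 3 mi 1).foldl
      (fun (st : Int × Int × Int) _n =>
        let result := st.2.1 + st.2.2
        (st.1 + result, result, st.2.1)) (3, 1, 1)
    PySem.Int.mod st.1 10

-- the default 0 of pyGetD is never used under Pre_ (t ≤ len m keeps every index in range)
def humanPopulation (m : List Int) (t : Int) : List Int :=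
  (PySem.List.pyRange 0 t 1).foldl
    (fun left_humans i => left_humans ++ [pvAinner (PySem.List.pyGetD m i 0)]) []

-- ===== PORT B =====
-- Source B's table-building loop: state (table, a, b)
def pvTableState : List Int × Int × Int :=
  (PySem.List.pyRange 0 60 1).foldl
    (fun (st : List Int × Int × Int) _ =>
      (st.1 ++ [st.2.1], st.2.2, PySem.Int.mod (st.2.1 + st.2.2) 10)) ([], 0, 1)

def humanPopulation_alt (m : List Int) (t : Int) : List Int :=
  (PySem.List.slice m none (some (max t 0))).map
    (fun x => if x ≤ 1 then 1
              else PySem.List.pyGetD pvTableState.1 (PySem.Int.mod (x + 1) 60) 0)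

-- ===== PRECONDITION & SPEC =====
-- A raises IndexError when t exceeds len(m); exactly those inputs are excluded.
def Pre_humanPopulation (m : List Int) (t : Int) : Prop := t ≤ (m.length : Int)
instance (m : List Int) (t : Int) : Decidable (Pre_humanPopulation m t) := by
  unfold Pre_humanPopulation; infer_instance
def pvWitness_humanPopulation : List Int × Int := ([1, 2, 3, 10], 4)

def Spec_humanPopulation (m : List Int) (t : Int) (out : List Int) : Prop := out = humanPopulation_alt m t
instance (m : List Int) (t : Int) (out : List Int) : Decidable (Spec_humanPopulation m t out) := by unfold Spec_humanPopulation; infer_instance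

-- ===== CLAIM (what is proved, stated in full; the proofs are below) =====
def Claim_equal_humanPopulation : Prop := ∀ (m : List Int) (t : Int), Dom_humanPopulation m t → Pre_humanPopulation m t → Spec_humanPopulation m t (humanPopulation m t)

-- ===== LEMMAS AND PROOFS =====

-- the table B's loop builds, as a literal
def pvTableLit : List Int :=
  [0, 1, 1, 2, 3, 5, 8, 3, 1, 4, 5, 9, 4, 3, 7, 0, 7, 7, 4, 1,
   5, 6, 1, 7, 8, 5, 3, 8, 1, 9, 0, 9, 9, 8, 7, 5, 2, 7, 9, 6,
   5, 1, 6, 7, 3, 0, 3, 3, 6, 9, 5, 4, 9, 3, 2, 5, 7, 2, 9, 1]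

theorem pvTableState_eq : pvTableState.1 = pvTableLit := by decide

-- Pisano period 60 for Fib mod 10
theorem pvFibMod10_period (n : Nat) : Nat.fib (n + 60) % 10 = Nat.fib n % 10 := by
  induction n using Nat.twoStepInduction with
  | zero => decide
  | one => decide
  | more n ih1 ih2 =>
    calc Nat.fib (n + 2 + 60) % 10
        = (Nat.fib (n + 60) + Nat.fib (n + 1 + 60)) % 10 := by
          rw [show n + 2 + 60 = (n + 60) + 2 from by omega,
              Nat.fib_add_two (n := n + 60),
              show n + 60 + 1 = n + 1 + 60 from by omega]
      _ = (Nat.fib n + Nat.fib (n + 1)) % 10 := by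
          rw [Nat.add_mod, ih1, ih2, ← Nat.add_mod]
      _ = Nat.fib (n + 2) % 10 := by rw [Nat.fib_add_two]

theorem pvFibMod10_period_mul (q r : Nat) :
    Nat.fib (60 * q + r) % 10 = Nat.fib r % 10 := by
  induction q with
  | zero => simp
  | succ q ih =>
    have h : 60 * (q + 1) + r = (60 * q + r) + 60 := by omega
    rw [h, pvFibMod10_period, ih]

theorem pvTableLit_lt (r : Nat) (h : r < 60) :
    pvTableLit.getD r 0 = ((Nat.fib r % 10 : Nat) : Int) := by
  interval_cases r <;> decide

theorem pvTableLit_getD (n : Nat) :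
    pvTableLit.getD (n % 60) 0 = ((Nat.fib n % 10 : Nat) : Int) := by
  rw [pvTableLit_lt (n % 60) (Nat.mod_lt _ (by omega))]
  have := pvFibMod10_period_mul (n / 60) (n % 60)
  rw [Nat.div_add_mod] at this
  rw [this]

-- A's inner loop computes the Fibonacci pair; its running total is F(k+4)
theorem pvAloop (k : Nat) :
    (PySem.List.pyRange 3 (3 + (k : Int)) 1).foldl
      (fun (st : Int × Int × Int) _n =>
        let result := st.2.1 + st.2.2
        (st.1 + result, result, st.2.1)) (3, 1, 1)
    = ((Nat.fib (k + 4) : Int), (Nat.fib (k + 2) : Int), (Nat.fib (k + 1) : Int)) := by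
  induction k with
  | zero => rw [show (3 : Int) + ((0 : Nat) : Int) = 3 by norm_num,
                PySem.List.pyRange_one_eq_nil (by omega)]
            simp; decide
  | succ k ih =>
    have h : (3 : Int) + (((k : Nat) + 1 : Nat) : Int) = (3 + (k : Int)) + 1 := by
      push_cast; ring
    rw [h, PySem.List.pyRange_one_succ_right (by omega), List.foldl_append, ih]
    simp only [List.foldl_cons, List.foldl_nil]
    have f3 : Nat.fib (k + 3) = Nat.fib (k + 1) + Nat.fib (k + 2) := by
      have := Nat.fib_add_two (n := k + 1); omega
    have f5 : Nat.fib (k + 1 + 4) = Nat.fib (k + 3) + Nat.fib (k + 4) := by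
      have := Nat.fib_add_two (n := k + 3); omega
    refine Prod.ext ?_ (Prod.ext ?_ ?_)
    · show (Nat.fib (k+4) : Int) + ((Nat.fib (k+2) : Int) + (Nat.fib (k+1) : Int))
        = (Nat.fib (k+1+4) : Int)
      rw [f5, f3]; push_cast; ring
    · show (Nat.fib (k+2) : Int) + (Nat.fib (k+1) : Int) = (Nat.fib (k+1+2) : Int)
      rw [show k+1+2 = k+3 from by omega, f3]; push_cast; ring
    · show (Nat.fib (k+2) : Int) = (Nat.fib (k+1+1) : Int)
      norm_num

-- per-element equality: A's loop value = B's table lookup, for every Int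
theorem pvPoint (x : Int) :
    pvAinner x
      = if x ≤ 1 then 1
        else PySem.List.pyGetD pvTableState.1 (PySem.Int.mod (x + 1) 60) 0 := by
  rw [pvTableState_eq]
  by_cases h1 : x ≤ 1
  · simp [pvAinner, h1]
  · by_cases h2 : x = 2
    · subst h2; simp [pvAinner]; decide
    · have hx : 3 ≤ x := by omega
      set k := (x - 3).toNat with hk
      have hxk : x = 3 + (k : Int) := by omega
      simp only [pvAinner, if_neg h2, if_neg h1]
      rw [hxk, pvAloop k]
      have hn : (3 : Int) + (k : Int) + 1 = ((k + 4 : Nat) : Int) := by push_cast; ring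
      have hm60 : PySem.Int.mod ((k + 4 : Nat) : Int) 60 = (((k + 4) % 60 : Nat) : Int) := by
        exact_mod_cast PySem.Int.mod_natCast (k + 4) 60
      have hm10 : PySem.Int.mod ((Nat.fib (k + 4) : Nat) : Int) 10
          = ((Nat.fib (k + 4) % 10 : Nat) : Int) := by
        exact_mod_cast PySem.Int.mod_natCast (Nat.fib (k + 4)) 10
      rw [hn, hm60, PySem.List.pyGetD_natCast]
      show PySem.Int.mod ((Nat.fib (k + 4) : Nat) : Int) 10
        = pvTableLit.getD ((k + 4) % 60) 0
      rw [hm10, pvTableLit_getD (k + 4)]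

-- A's append-fold over range(t) is a map over the taken prefix (t ≤ len m)
theorem pvMapRange (g : Int → Int) (m : List Int) (k : Nat) (hk : k ≤ m.length) :
    (PySem.List.pyRange 0 (k : Int) 1).map (fun i => g (PySem.List.pyGetD m i 0))
      = (m.take k).map g := by
  induction k with
  | zero => rw [PySem.List.pyRange_one_eq_nil (by norm_num)]; simp
  | succ k ih =>
    have h : (((k : Nat) + 1 : Nat) : Int) = (k : Int) + 1 := by push_cast; ring
    have hlt : k < m.length := by omega
    rw [h, PySem.List.pyRange_one_succ_right (by omega), List.map_append,
        ih (by omega), List.take_add_one, List.map_append,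
        List.getElem?_eq_getElem hlt]
    simp [PySem.List.pyGetD_natCast, List.getD, List.getElem?_eq_getElem hlt]

-- ===== VERDICT (by name: the statement is the Claim_ definition above) =====
theorem humanPopulation_spec : Claim_equal_humanPopulation := by
  intro m t _hDom hPre
  replace hPre : t ≤ (m.length : Int) := hPre
  show humanPopulation m t = humanPopulation_alt m t
  unfold humanPopulation humanPopulation_alt
  rw [PySem.List.foldl_append_singleton_eq_map, List.nil_append]
  by_cases ht : t ≤ 0
  · rw [PySem.List.pyRange_one_eq_nil ht, show max t 0 = 0 from by omega,
        PySem.List.slice_to m (by omega)]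
    simp
  · have h0 : 0 ≤ t := by omega
    set k := t.toNat with hkdef
    have hkt : t = (k : Int) := by omega
    have hk : k ≤ m.length := by omega
    rw [show max t 0 = t from by omega, PySem.List.slice_to m h0, hkt,
        show ((k : Int)).toNat = k from by omega, pvMapRange pvAinner m k hk]
    apply List.map_congr_left
    intro x _
    exact pvPoint x
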